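-- pv_equiv track=rewrite | github.com/ajayspersonalacc1-beep/ADEA-hackathon | adea/utils/agent_status.py | _derive_agent_status
-- ===== SOURCE A (Python) =====
-- _AGENT_TAGS = {
--     "Planner": "[PLANNER]",
--     "Executor": "[EXECUTOR]",
--     "Monitor": "[MONITOR]",
--     "SchemaDiscovery": "[SCHEMA]",
--     "Diagnosis": "[DIAGNOSIS]",
--     "Repair": "[REPAIR]",
--     "Optimization": "[OPTIMIZATION]",
-- }
--
-- _COMPLETION_HINTS = {
--     "Planner": ("generated pipeline plan",),
--     "Executor": ("pipeline execution completed successfully",),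
--     "Monitor": ("no anomalies detected", "monitoring classified anomaly"),
--     "SchemaDiscovery": ("schema discovery found", "detected tables:", "no tables discovered"),
--     "Diagnosis": ("diagnosis identified root cause",),
--     "Repair": (
--         "repair agent used llm-generated repair",
--         "repair prepended",
--         "repair rewrote the failing query",
--         "repair reused a previously successful sql fix from memory",
--         "repair logged an invalid column issue",
--         "repair could not apply an automatic fix",
--         "repair marked the pipeline as unrecoverable",
--     ),
--     "Optimization": ("optimization generated", "optimization found no immediate"),
-- }
--
-- _RUNNING_HINTS = {
--     "Planner": ("generating pipeline",),
--     "Executor": ("pipeline execution started",),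
--     "Monitor": ("monitoring",),
--     "SchemaDiscovery": ("schema discovery scanning",),
--     "Diagnosis": ("diagnosis started root-cause analysis", "diagnosis analyzing anomaly"),
--     "Repair": ("repair started remediation planning",),
--     "Optimization": ("optimization agent analyzing pipeline plan",),
-- }
--
-- _FAILURE_HINTS = {
--     "Executor": ("pipeline execution failed",),
--     "Diagnosis": ("diagnosis llm failed", "output rejected"),
--     "Repair": ("mark_unrecoverable",),
-- }
--
-- def _derive_agent_status(agent: str, normalized_logs: list[str]) -> str:
--     """Derive the current status for one agent from execution logs."""
--
--     tag = _AGENT_TAGS[agent].lower()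
--     status = "waiting"
--
--     for log in normalized_logs:
--         if tag not in log:
--             continue
--
--         if any(marker in log for marker in _FAILURE_HINTS.get(agent, ())):
--             status = "failed"
--             continue
--
--         if any(marker in log for marker in _COMPLETION_HINTS[agent]):
--             status = "completed"
--             continue
--
--         if any(marker in log for marker in _RUNNING_HINTS[agent]):
--             status = "running"
--             continue
--
--         status = "completed"
--
--     return status
-- ===== SOURCE B (Python) =====
-- # Table-driven: one flat (marker -> status) rule list per agent, scanned in reverse
-- # for the last tagged line, which alone decides the status.
-- _RULES = {
--     "Planner": ("[planner]", [
--         ("generated pipeline plan", "completed"),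
--         ("generating pipeline", "running"),
--     ]),
--     "Executor": ("[executor]", [
--         ("pipeline execution failed", "failed"),
--         ("pipeline execution completed successfully", "completed"),
--         ("pipeline execution started", "running"),
--     ]),
--     "Monitor": ("[monitor]", [
--         ("no anomalies detected", "completed"),
--         ("monitoring classified anomaly", "completed"),
--         ("monitoring", "running"),
--     ]),
--     "SchemaDiscovery": ("[schema]", [
--         ("schema discovery found", "completed"),
--         ("detected tables:", "completed"),
--         ("no tables discovered", "completed"),
--         ("schema discovery scanning", "running"),
--     ]),
--     "Diagnosis": ("[diagnosis]", [
--         ("diagnosis llm failed", "failed"),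
--         ("output rejected", "failed"),
--         ("diagnosis identified root cause", "completed"),
--         ("diagnosis started root-cause analysis", "running"),
--         ("diagnosis analyzing anomaly", "running"),
--     ]),
--     "Repair": ("[repair]", [
--         ("mark_unrecoverable", "failed"),
--         ("repair agent used llm-generated repair", "completed"),
--         ("repair prepended", "completed"),
--         ("repair rewrote the failing query", "completed"),
--         ("repair reused a previously successful sql fix from memory", "completed"),
--         ("repair logged an invalid column issue", "completed"),
--         ("repair could not apply an automatic fix", "completed"),
--         ("repair marked the pipeline as unrecoverable", "completed"),
--         ("repair started remediation planning", "running"),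
--     ]),
--     "Optimization": ("[optimization]", [
--         ("optimization generated", "completed"),
--         ("optimization found no immediate", "completed"),
--         ("optimization agent analyzing pipeline plan", "running"),
--     ]),
-- }
--
--
-- def _derive_agent_status(agent: str, normalized_logs: list[str]) -> str:
--     """Only the LAST line carrying the agent's tag decides the status."""
--     tag, rules = _RULES[agent]
--     for log in reversed(normalized_logs):
--         if tag in log:
--             return next((status for marker, status in rules if marker in log), "completed")
--     return "waiting"
-- ===== Notes on version B (the rewrite author's own statement) =====
-- stated objective: alternative
-- what changed: B replaces A's three separate hint dicts and forward status-overwriting fold with one flat per-agent (marker -> status) rule table (with the lowercased tag precomputed) and a reverse scan that returns the first matching rule of the last tagged line, 'waiting' if no line carries the tag.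
import Mathlib
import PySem

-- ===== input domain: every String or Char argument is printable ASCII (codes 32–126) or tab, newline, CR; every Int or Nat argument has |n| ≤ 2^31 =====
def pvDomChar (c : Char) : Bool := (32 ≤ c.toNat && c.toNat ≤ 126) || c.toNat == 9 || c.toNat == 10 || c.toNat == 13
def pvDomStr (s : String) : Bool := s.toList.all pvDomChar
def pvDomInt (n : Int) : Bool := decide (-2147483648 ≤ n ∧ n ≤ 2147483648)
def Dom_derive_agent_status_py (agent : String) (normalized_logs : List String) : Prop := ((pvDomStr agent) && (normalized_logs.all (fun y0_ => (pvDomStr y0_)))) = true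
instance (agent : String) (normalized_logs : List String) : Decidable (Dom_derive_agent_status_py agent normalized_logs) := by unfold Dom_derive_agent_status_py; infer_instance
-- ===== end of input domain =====

-- B replaces A's three hint dicts + forward status-overwriting fold with one flat per-agent
-- (marker -> status) rule table and a reverse scan returning the last tagged line's first
-- matching rule (alternative decomposition; same cost).


-- ===== PORT A =====
def pvAgentTags : PySem.Dict String String :=
  PySem.Dict.ofList [("Planner", "[PLANNER]"), ("Executor", "[EXECUTOR]"), ("Monitor", "[MONITOR]"),
   ("SchemaDiscovery", "[SCHEMA]"), ("Diagnosis", "[DIAGNOSIS]"), ("Repair", "[REPAIR]"),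
   ("Optimization", "[OPTIMIZATION]")]

def pvCompletionHints : PySem.Dict String (List String) :=
  PySem.Dict.ofList [("Planner", ["generated pipeline plan"]),
   ("Executor", ["pipeline execution completed successfully"]),
   ("Monitor", ["no anomalies detected", "monitoring classified anomaly"]),
   ("SchemaDiscovery", ["schema discovery found", "detected tables:", "no tables discovered"]),
   ("Diagnosis", ["diagnosis identified root cause"]),
   ("Repair", ["repair agent used llm-generated repair", "repair prepended",
     "repair rewrote the failing query", "repair reused a previously successful sql fix from memory",
     "repair logged an invalid column issue", "repair could not apply an automatic fix",
     "repair marked the pipeline as unrecoverable"]),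
   ("Optimization", ["optimization generated", "optimization found no immediate"])]

def pvRunningHints : PySem.Dict String (List String) :=
  PySem.Dict.ofList [("Planner", ["generating pipeline"]),
   ("Executor", ["pipeline execution started"]),
   ("Monitor", ["monitoring"]),
   ("SchemaDiscovery", ["schema discovery scanning"]),
   ("Diagnosis", ["diagnosis started root-cause analysis", "diagnosis analyzing anomaly"]),
   ("Repair", ["repair started remediation planning"]),
   ("Optimization", ["optimization agent analyzing pipeline plan"])]

def pvFailureHints : PySem.Dict String (List String) :=
  PySem.Dict.ofList [("Executor", ["pipeline execution failed"]),
   ("Diagnosis", ["diagnosis llm failed", "output rejected"]),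
   ("Repair", ["mark_unrecoverable"])]

-- _AGENT_TAGS[agent] / _COMPLETION_HINTS[agent] / _RUNNING_HINTS[agent] are ported with getD;
-- the KeyError inputs (agent not a known name) are excluded by Pre_ below.
def derive_agent_status_py (agent : String) (normalized_logs : List String) : String :=
  let tag := PySem.Str.lower (PySem.Dict.getD pvAgentTags agent "")
  normalized_logs.foldl (fun status log =>
    if !(PySem.Str.isIn tag log) then status
    else if (PySem.Dict.getD pvFailureHints agent []).any (fun marker => PySem.Str.isIn marker log) then "failed"
    else if (PySem.Dict.getD pvCompletionHints agent []).any (fun marker => PySem.Str.isIn marker log) then "completed"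
    else if (PySem.Dict.getD pvRunningHints agent []).any (fun marker => PySem.Str.isIn marker log) then "running"
    else "completed") "waiting"

-- ===== PORT B =====
-- Source B's _RULES: the lowercased tag and one flat priority-ordered (marker, status) list per agent
def pvRules : PySem.Dict String (String × List (String × String)) :=
  PySem.Dict.ofList
   [("Planner", ("[planner]",
      [("generated pipeline plan", "completed"),
       ("generating pipeline", "running")])),
    ("Executor", ("[executor]",
      [("pipeline execution failed", "failed"),
       ("pipeline execution completed successfully", "completed"),
       ("pipeline execution started", "running")])),
    ("Monitor", ("[monitor]",
      [("no anomalies detected", "completed"),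
       ("monitoring classified anomaly", "completed"),
       ("monitoring", "running")])),
    ("SchemaDiscovery", ("[schema]",
      [("schema discovery found", "completed"),
       ("detected tables:", "completed"),
       ("no tables discovered", "completed"),
       ("schema discovery scanning", "running")])),
    ("Diagnosis", ("[diagnosis]",
      [("diagnosis llm failed", "failed"),
       ("output rejected", "failed"),
       ("diagnosis identified root cause", "completed"),
       ("diagnosis started root-cause analysis", "running"),
       ("diagnosis analyzing anomaly", "running")])),
    ("Repair", ("[repair]",
      [("mark_unrecoverable", "failed"),
       ("repair agent used llm-generated repair", "completed"),
       ("repair prepended", "completed"),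
       ("repair rewrote the failing query", "completed"),
       ("repair reused a previously successful sql fix from memory", "completed"),
       ("repair logged an invalid column issue", "completed"),
       ("repair could not apply an automatic fix", "completed"),
       ("repair marked the pipeline as unrecoverable", "completed"),
       ("repair started remediation planning", "running")])),
    ("Optimization", ("[optimization]",
      [("optimization generated", "completed"),
       ("optimization found no immediate", "completed"),
       ("optimization agent analyzing pipeline plan", "running")]))]

-- next((status for marker, status in rules if marker in log), "completed")
def pvFirstRule (rules : List (String × String)) (log : String) : String :=
  (rules.findSome? (fun r => if PySem.Str.isIn r.1 log then some r.2 else none)).getD "completed"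

-- the 'for log in reversed(...): if tag in log: return ...' loop of Source B
def pvLastTagged (tag : String) (rules : List (String × String)) : List String → String
  | [] => "waiting"
  | log :: rest =>
      if PySem.Str.isIn tag log then pvFirstRule rules log else pvLastTagged tag rules rest

def derive_agent_status_py_alt (agent : String) (normalized_logs : List String) : String :=
  let tr := PySem.Dict.getD pvRules agent ("", [])
  pvLastTagged tr.1 tr.2 normalized_logs.reverse

-- ===== PRECONDITION & SPEC =====
-- Pre_ excludes exactly the agent names absent from _AGENT_TAGS/_RULES, on which both raise KeyError.
def Pre_derive_agent_status_py (agent : String) (normalized_logs : List String) : Prop :=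
  agent ∈ ["Planner", "Executor", "Monitor", "SchemaDiscovery", "Diagnosis", "Repair", "Optimization"]
instance (agent : String) (normalized_logs : List String) : Decidable (Pre_derive_agent_status_py agent normalized_logs) := by unfold Pre_derive_agent_status_py; infer_instance
def pvWitness_derive_agent_status_py : String × List String :=
  ("Executor", ["[executor] pipeline execution started", "[executor] pipeline execution failed"])

def Spec_derive_agent_status_py (agent : String) (normalized_logs : List String) (out : String) : Prop := out = derive_agent_status_py_alt agent normalized_logs
instance (agent : String) (normalized_logs : List String) (out : String) : Decidable (Spec_derive_agent_status_py agent normalized_logs out) := by unfold Spec_derive_agent_status_py; infer_instance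

-- ===== CLAIM (what is proved, stated in full; the proofs are below) =====
def Claim_equal_derive_agent_status_py : Prop := ∀ (agent : String) (normalized_logs : List String), Dom_derive_agent_status_py agent normalized_logs → Pre_derive_agent_status_py agent normalized_logs → Spec_derive_agent_status_py agent normalized_logs (derive_agent_status_py agent normalized_logs)

-- ===== LEMMAS AND PROOFS =====

-- A's per-line classification, factored out for the proof only
def pvClassifyA (agent log : String) : String :=
  if (PySem.Dict.getD pvFailureHints agent []).any (fun marker => PySem.Str.isIn marker log) then "failed"
  else if (PySem.Dict.getD pvCompletionHints agent []).any (fun marker => PySem.Str.isIn marker log) then "completed"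
  else if (PySem.Dict.getD pvRunningHints agent []).any (fun marker => PySem.Str.isIn marker log) then "running"
  else "completed"

-- reverse scan with A's classifier, proof-only
def pvScanA (agent tag : String) : List String → String
  | [] => "waiting"
  | log :: rest => if PySem.Str.isIn tag log then pvClassifyA agent log else pvScanA agent tag rest

lemma pvFold_eq_scanA (agent tag : String) (logs : List String) (st : String) :
    logs.foldl (fun status log =>
      if !(PySem.Str.isIn tag log) then status
      else if (PySem.Dict.getD pvFailureHints agent []).any (fun marker => PySem.Str.isIn marker log) then "failed"
      else if (PySem.Dict.getD pvCompletionHints agent []).any (fun marker => PySem.Str.isIn marker log) then "completed"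
      else if (PySem.Dict.getD pvRunningHints agent []).any (fun marker => PySem.Str.isIn marker log) then "running"
      else "completed") st
    = if logs.any (fun l => PySem.Str.isIn tag l) then pvScanA agent tag logs.reverse else st := by
  induction logs using List.reverseRecOn with
  | nil => simp
  | append_singleton ls l ih =>
    rw [List.foldl_append, List.foldl_cons, List.foldl_nil, List.reverse_append]
    simp only [List.reverse_cons, List.reverse_nil, List.nil_append, List.singleton_append,
      List.any_append, List.any_cons, List.any_nil, Bool.or_false, pvScanA]
    cases h : PySem.Str.isIn tag l with
    | true =>
      rw [ih]
      simp only [Bool.not_true, Bool.false_eq_true, if_false, Bool.or_true, if_true, pvClassifyA]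
    | false =>
      rw [ih]
      simp only [Bool.not_false, if_true, Bool.or_false, Bool.false_eq_true, if_false]

lemma pvScanA_no_match (agent tag : String) (xs : List String)
    (h : xs.any (fun l => PySem.Str.isIn tag l) = false) :
    pvScanA agent tag xs = "waiting" := by
  induction xs with
  | nil => rfl
  | cons x rest ih =>
    simp only [List.any_cons, Bool.or_eq_false_iff] at h
    simp only [pvScanA]
    rw [h.1]
    simp only [Bool.false_eq_true, if_false]
    exact ih h.2

-- findSome? over a constant-status block of rules is just 'any'
lemma pvFindSome_map_const (L : List String) (s log : String) :
    (L.map (fun m => (m, s))).findSome? (fun r => if PySem.Str.isIn r.1 log then some r.2 else none)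
    = if L.any (fun m => PySem.Str.isIn m log) then some s else none := by
  induction L with
  | nil => rfl
  | cons m rest ih =>
    rcases Bool.dichotomy (PySem.Str.isIn m log) with h | h <;>
      simp only [List.map_cons, List.findSome?_cons, List.any_cons, h, Bool.false_eq_true,
        if_false, if_true, Bool.false_or, Bool.true_or]
    · exact ih

-- a flat failure++completion++running rule list classifies like A's staged checks
lemma pvFirstRule_eq (F C R : List String) (log : String) :
    pvFirstRule (F.map (fun m => (m, "failed")) ++ C.map (fun m => (m, "completed"))
      ++ R.map (fun m => (m, "running"))) log
    = (if F.any (fun m => PySem.Str.isIn m log) then "failed"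
       else if C.any (fun m => PySem.Str.isIn m log) then "completed"
       else if R.any (fun m => PySem.Str.isIn m log) then "running"
       else "completed") := by
  unfold pvFirstRule
  rw [List.findSome?_append, List.findSome?_append, pvFindSome_map_const, pvFindSome_map_const,
    pvFindSome_map_const]
  cases hF : F.any (fun m => PySem.Str.isIn m log) <;>
    cases hC : C.any (fun m => PySem.Str.isIn m log) <;>
    cases hR : R.any (fun m => PySem.Str.isIn m log) <;> simp

lemma pvScanA_eq_lastTagged (agent tag : String) (rules : List (String × String)) (xs : List String)
    (h : ∀ log, pvClassifyA agent log = pvFirstRule rules log) :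
    pvScanA agent tag xs = pvLastTagged tag rules xs := by
  induction xs with
  | nil => rfl
  | cons x rest ih =>
    simp only [pvScanA, pvLastTagged, h, ih]

-- one agent at a time: both ports reduce to the same reverse scan
lemma pvPerAgent (agent : String) (logs : List String)
    (tag : String) (rules : List (String × String))
    (htag : PySem.Str.lower (PySem.Dict.getD pvAgentTags agent "") = tag)
    (hrules : PySem.Dict.getD pvRules agent ("", []) = (tag, rules))
    (hcls : ∀ log, pvClassifyA agent log = pvFirstRule rules log) :
    derive_agent_status_py agent logs = derive_agent_status_py_alt agent logs := by
  unfold derive_agent_status_py derive_agent_status_py_alt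
  rw [htag, hrules]
  rw [pvFold_eq_scanA]
  cases h : logs.any (fun l => PySem.Str.isIn tag l) with
  | true =>
    rw [if_pos rfl]
    exact pvScanA_eq_lastTagged agent tag rules logs.reverse hcls
  | false =>
    rw [if_neg Bool.false_ne_true]
    refine Eq.symm ?_
    rw [← pvScanA_eq_lastTagged agent tag rules logs.reverse hcls]
    exact pvScanA_no_match _ _ _ (by rw [List.any_reverse]; exact h)

-- ===== VERDICT (by name: the statement is the Claim_ definition above) =====
theorem derive_agent_status_py_spec : Claim_equal_derive_agent_status_py := by
  intro agent logs _ hpre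
  unfold Spec_derive_agent_status_py
  unfold Pre_derive_agent_status_py at hpre
  simp only [List.mem_cons, List.not_mem_nil, or_false] at hpre
  rcases hpre with h | h | h | h | h | h | h <;> subst h
  · exact pvPerAgent _ logs "[planner]"
      (["generated pipeline plan"].map (fun m => (m, "completed"))
        ++ ["generating pipeline"].map (fun m => (m, "running")))
      (by decide) (by decide) (fun log => by
        have := pvFirstRule_eq [] ["generated pipeline plan"] ["generating pipeline"] log
        simp only [List.map_nil, List.nil_append] at this
        rw [this]; rfl)
  · exact pvPerAgent _ logs "[executor]"
      (["pipeline execution failed"].map (fun m => (m, "failed"))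
        ++ ["pipeline execution completed successfully"].map (fun m => (m, "completed"))
        ++ ["pipeline execution started"].map (fun m => (m, "running")))
      (by decide) (by decide) (fun log => by
        rw [pvFirstRule_eq]; rfl)
  · exact pvPerAgent _ logs "[monitor]"
      (["no anomalies detected", "monitoring classified anomaly"].map (fun m => (m, "completed"))
        ++ ["monitoring"].map (fun m => (m, "running")))
      (by decide) (by decide) (fun log => by
        have := pvFirstRule_eq [] ["no anomalies detected", "monitoring classified anomaly"] ["monitoring"] log
        simp only [List.map_nil, List.nil_append] at this
        rw [this]; rfl)
  · exact pvPerAgent _ logs "[schema]"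
      (["schema discovery found", "detected tables:", "no tables discovered"].map (fun m => (m, "completed"))
        ++ ["schema discovery scanning"].map (fun m => (m, "running")))
      (by decide) (by decide) (fun log => by
        have := pvFirstRule_eq [] ["schema discovery found", "detected tables:", "no tables discovered"] ["schema discovery scanning"] log
        simp only [List.map_nil, List.nil_append] at this
        rw [this]; rfl)
  · exact pvPerAgent _ logs "[diagnosis]"
      (["diagnosis llm failed", "output rejected"].map (fun m => (m, "failed"))
        ++ ["diagnosis identified root cause"].map (fun m => (m, "completed"))
        ++ ["diagnosis started root-cause analysis", "diagnosis analyzing anomaly"].map (fun m => (m, "running")))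
      (by decide) (by decide) (fun log => by
        rw [pvFirstRule_eq]; rfl)
  · exact pvPerAgent _ logs "[repair]"
      (["mark_unrecoverable"].map (fun m => (m, "failed"))
        ++ ["repair agent used llm-generated repair", "repair prepended",
            "repair rewrote the failing query", "repair reused a previously successful sql fix from memory",
            "repair logged an invalid column issue", "repair could not apply an automatic fix",
            "repair marked the pipeline as unrecoverable"].map (fun m => (m, "completed"))
        ++ ["repair started remediation planning"].map (fun m => (m, "running")))
      (by decide) (by decide) (fun log => by
        rw [pvFirstRule_eq]; rfl)
  · exact pvPerAgent _ logs "[optimization]"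
      (["optimization generated", "optimization found no immediate"].map (fun m => (m, "completed"))
        ++ ["optimization agent analyzing pipeline plan"].map (fun m => (m, "running")))
      (by decide) (by decide) (fun log => by
        have := pvFirstRule_eq [] ["optimization generated", "optimization found no immediate"] ["optimization agent analyzing pipeline plan"] log
        simp only [List.map_nil, List.nil_append] at this
        rw [this]; rfl)
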